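-- pv_equiv track=rewrite | github.com/kambleakash0/agent-skills | mcp-servers/rmd-editor/rmd_editor/parser.py | _parse_label_and_options
-- ===== SOURCE A (Python) =====
-- from collections import OrderedDict
-- from typing import Optional
--
-- def _parse_label_and_options(inside: str) -> tuple[Optional[str], "OrderedDict[str, str]"]:
--     """
--     Given the text between `{r ` and `}` (e.g. `label, echo=FALSE, fig.width=7`),
--     return (label, options). Label is the first bare token without '='.
--     Options preserve insertion order.
--     """
--     label: Optional[str] = None
--     options: "OrderedDict[str, str]" = OrderedDict()
--     parts = _split_top_level_commas(inside)
--     for idx, part in enumerate(parts):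
--         if not part:
--             continue
--         if "=" not in part:
--             # Bare token -- if this is the first part and we don't have a label yet, it's the label
--             if idx == 0 and label is None:
--                 label = part.strip()
--             # Otherwise it's a stray bare flag; stash as key with empty value
--             else:
--                 options[part.strip()] = ""
--         else:
--             k, _, v = part.partition("=")
--             options[k.strip()] = v.strip()
--     return label, options
--
-- def _split_top_level_commas(s: str) -> list[str]:
--     """Split on commas that aren't nested inside (), [], {}, or quotes."""
--     parts: list[str] = []
--     buf: list[str] = []
--     depth = 0
--     quote: Optional[str] = None
--     for c in s:
--         if quote is not None:
--             buf.append(c)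
--             if c == quote:
--                 quote = None
--             continue
--         if c in ("'", '"'):
--             quote = c
--             buf.append(c)
--             continue
--         if c in "([{":
--             depth += 1
--         elif c in ")]}":
--             depth -= 1
--         if c == "," and depth == 0:
--             parts.append("".join(buf).strip())
--             buf = []
--         else:
--             buf.append(c)
--     if buf:
--         parts.append("".join(buf).strip())
--     return parts
-- ===== SOURCE B (Python) =====
-- from collections import OrderedDict
-- from typing import Optional
--
-- def _top_level_comma_index(s: str) -> Optional[int]:
--     """Index of the first comma in s that is not nested in (), [], {} or quotes."""
--     depth = 0
--     quote: Optional[str] = None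
--     for i, c in enumerate(s):
--         if quote is not None:
--             if c == quote:
--                 quote = None
--         elif c in ("'", '"'):
--             quote = c
--         else:
--             if c in "([{":
--                 depth += 1
--             elif c in ")]}":
--                 depth -= 1
--             if c == "," and depth == 0:
--                 return i
--     return None
--
-- def _parse_label_and_options(inside: str) -> tuple[Optional[str], "OrderedDict[str, str]"]:
--     """Delimiter-search tokenizer: repeatedly locate the next top-level comma and
--     slice the token off the front, instead of accumulating characters into buffers
--     and a parts list. Restarting the bracket/quote automaton for each token is
--     sound because a split can only happen at depth 0 outside quotes. Tokens are
--     classified via the emptiness of partition's separator."""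
--     label: Optional[str] = None
--     options: "OrderedDict[str, str]" = OrderedDict()
--     rest = inside
--     first = True
--     while True:
--         j = _top_level_comma_index(rest)
--         token = (rest if j is None else rest[:j]).strip()
--         if token:
--             k, eq, v = token.partition("=")
--             if not eq:
--                 if first:
--                     label = token
--                 else:
--                     options[token] = ""
--             else:
--                 options[k.strip()] = v.strip()
--         first = False
--         if j is None:
--             break
--         rest = rest[j + 1:]
--     return label, options
-- ===== Notes on version B (the rewrite author's own statement) =====
-- stated objective: alternative
-- what changed: Replaces A's character-accumulating split (persistent buf/parts/depth/quote state over the whole string, then a second enumerate pass classifying the parts list) with a delimiter-search tokenizer: repeatedly find the index of the next top-level comma with a fresh bracket/quote automaton per token (sound because splits only occur at depth 0 outside quotes), slice the token off the front, and classify it immediately via partition's separator emptiness; no buffer, no parts list, no index counter.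
import Mathlib
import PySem

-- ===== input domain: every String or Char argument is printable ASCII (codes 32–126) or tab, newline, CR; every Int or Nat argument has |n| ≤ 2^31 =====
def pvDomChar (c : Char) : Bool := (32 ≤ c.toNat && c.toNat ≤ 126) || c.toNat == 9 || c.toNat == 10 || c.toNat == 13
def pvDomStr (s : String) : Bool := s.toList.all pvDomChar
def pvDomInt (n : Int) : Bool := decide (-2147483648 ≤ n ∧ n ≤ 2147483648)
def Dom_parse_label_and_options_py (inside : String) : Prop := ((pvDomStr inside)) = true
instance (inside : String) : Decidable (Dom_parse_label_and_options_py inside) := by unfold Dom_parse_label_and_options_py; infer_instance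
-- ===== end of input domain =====

-- B replaces A's character-accumulating split (persistent buf/parts/depth/quote over the whole
-- string, then a second enumerate pass classifying the parts list) with a delimiter-search
-- tokenizer: find the index of the next top-level comma with a fresh automaton per token, slice
-- the token off the front, classify it immediately (objective: alternative, same O(n) cost).

-- ===== PORT A =====
-- one character step of _split_top_level_commas (state: parts, buf, depth, quote)
def pvSplitStep (st : List (List Char) × List Char × Int × Option Char) (c : Char) :
    List (List Char) × List Char × Int × Option Char :=
  match st with
  | (parts, buf, depth, some q) =>
      (parts, buf ++ [c], depth, if c == q then none else some q)
  | (parts, buf, depth, none) =>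
      if c == '\'' || c == '"' then (parts, buf ++ [c], depth, some c)
      else
        let depth2 := if c == '(' || c == '[' || c == '{' then depth + 1
                      else if c == ')' || c == ']' || c == '}' then depth - 1 else depth
        if c == ',' && depth2 == 0 then (parts ++ [PySem.Chars.strip buf], [], depth2, none)
        else (parts, buf ++ [c], depth2, none)

def pvSplitTopLevelCommas (s : List Char) : List (List Char) :=
  match s.foldl pvSplitStep ([], [], 0, none) with
  | (parts, buf, _, _) => if buf.isEmpty then parts else parts ++ [PySem.Chars.strip buf]

-- one iteration of A's classification loop over enumerate(parts)
def pvClassifyStep (st : Option String × PySem.Dict String String) (ip : Int × List Char) :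
    Option String × PySem.Dict String String :=
  match st, ip with
  | (label, options), (idx, part) =>
      if part.isEmpty then (label, options)
      else if !(part.contains '=') then
        if idx == 0 && label == none then (some (String.mk (PySem.Chars.strip part)), options)
        else (label, options.insert (String.mk (PySem.Chars.strip part)) "")
      else
        -- Python's part.partition("="): split at the FIRST '=' ('=' ∈ part in this branch) — exact
        let k := part.takeWhile (· ≠ '=')
        let v := (part.dropWhile (· ≠ '=')).drop 1
        (label, options.insert (String.mk (PySem.Chars.strip k)) (String.mk (PySem.Chars.strip v)))

def parse_label_and_options_py (inside : String) : Option String × (List (String × String)) :=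
  let parts := pvSplitTopLevelCommas inside.toList
  match (PySem.List.enumerate parts).foldl pvClassifyStep (none, PySem.Dict.empty) with
  | (label, options) => (label, options.items)

-- ===== PORT B =====
-- B's _top_level_comma_index: index of the first top-level comma, or None.
-- (the enumerate index is carried as `.map (· + 1)` on the recursive call)
def pvFindAux : List Char → Int → Option Char → Option Nat
  | [], _, _ => none
  | c :: rest, depth, quote =>
    match quote with
    | some q => (pvFindAux rest depth (if c == q then none else some q)).map (· + 1)
    | none =>
      if c == '\'' || c == '"' then (pvFindAux rest depth (some c)).map (· + 1)
      else
        let depth2 := if c == '(' || c == '[' || c == '{' then depth + 1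
                      else if c == ')' || c == ']' || c == '}' then depth - 1 else depth
        if c == ',' && depth2 == 0 then some 0
        else (pvFindAux rest depth2 none).map (· + 1)

-- B's classification of one sliced-off token (the body of the `if token:` block)
def pvClassifyB (token : List Char) (first : Bool) (label : Option String)
    (options : PySem.Dict String String) : Option String × PySem.Dict String String :=
  if token.isEmpty then (label, options)
  else
    -- token.partition("="): k before the FIRST '='; eq empty iff no '=' — exact
    let k := token.takeWhile (· ≠ '=')
    let eqv := token.dropWhile (· ≠ '=')
    if eqv.isEmpty then
      if first then (some (String.mk token), options)
      else (label, options.insert (String.mk token) "")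
    else (label, options.insert (String.mk (PySem.Chars.strip k))
                   (String.mk (PySem.Chars.strip (eqv.drop 1))))

-- B's while loop: rest[:j] / rest[j+1:] become take/drop (j is a found index, 0 ≤ j < |rest|)
def pvParseB (cs : List Char) (first : Bool) (label : Option String)
    (options : PySem.Dict String String) : Option String × (List (String × String)) :=
  match h : pvFindAux cs 0 none with
  | none =>
      match pvClassifyB (PySem.Chars.strip cs) first label options with
      | (l', o') => (l', o'.items)
  | some j =>
      match pvClassifyB (PySem.Chars.strip (cs.take j)) first label options with
      | (l', o') => pvParseB (cs.drop (j + 1)) false l' o'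
termination_by cs.length
decreasing_by
  cases cs with
  | nil => simp [pvFindAux] at h
  | cons a t => simp [List.length_drop]

def parse_label_and_options_py_alt (inside : String) : Option String × (List (String × String)) :=
  pvParseB inside.toList true none PySem.Dict.empty

-- ===== PRECONDITION & SPEC =====
def Spec_parse_label_and_options_py (inside : String) (out : Option String × (List (String × String))) : Prop := out = parse_label_and_options_py_alt inside
instance (inside : String) (out : Option String × (List (String × String))) : Decidable (Spec_parse_label_and_options_py inside out) := by unfold Spec_parse_label_and_options_py; infer_instance

-- ===== CLAIM (what is proved, stated in full; the proofs are below) =====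
def Claim_equal_parse_label_and_options_py : Prop := ∀ (inside : String), Dom_parse_label_and_options_py inside → Spec_parse_label_and_options_py inside (parse_label_and_options_py inside)

-- ===== LEMMAS AND PROOFS =====

-- A's classification of a parts list, as a function (for the invariant)
def pvProc (parts : List (List Char)) : Option String × PySem.Dict String String :=
  (PySem.List.enumerate parts).foldl pvClassifyStep (none, PySem.Dict.empty)

-- A's output from the split-fold's final state
def pvOut (st : List (List Char) × List Char × Int × Option Char) :
    Option String × (List (String × String)) :=
  match st with
  | (parts, buf, _, _) =>
      let ps := if buf.isEmpty then parts else parts ++ [PySem.Chars.strip buf]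
      ((pvProc ps).1, (pvProc ps).2.items)

theorem pv_enumerate_append {α : Type} (l : List α) (x : α) (s : Int) :
    PySem.List.enumerate (l ++ [x]) s = PySem.List.enumerate l s ++ [(s + l.length, x)] := by
  induction l generalizing s with
  | nil => simp [PySem.List.enumerate]
  | cons a t ih => simp [PySem.List.enumerate, ih]; omega

theorem pv_dropWhile_prefix_fixed (p : Char → Bool) {y z : List Char}
    (hy : y.dropWhile p = y) (hpref : z <+: y) : z.dropWhile p = z := by
  cases z with
  | nil => rfl
  | cons a t =>
      obtain ⟨r, hr⟩ := hpref
      have ha : ¬ p a := by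
        intro hpa
        rw [← hr] at hy
        simp [hpa] at hy
        have h1 := List.length_dropWhile_le p (t ++ r)
        have h2 := congrArg List.length hy
        simp only [List.length_cons] at h2; omega
      simp [ha]

theorem pv_rstrip_prefix (y : List Char) : PySem.Chars.rstrip y <+: y := by
  have h := List.dropWhile_suffix (l := y.reverse) PySem.Chars.isspace
  simpa [PySem.Chars.rstrip] using List.reverse_prefix.mpr h

theorem pv_strip_idem (s : List Char) :
    PySem.Chars.strip (PySem.Chars.strip s) = PySem.Chars.strip s := by
  have hl : (PySem.Chars.lstrip s).dropWhile PySem.Chars.isspace = PySem.Chars.lstrip s := by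
    simp [PySem.Chars.lstrip, List.dropWhile_idempotent]
  have h1 : PySem.Chars.lstrip (PySem.Chars.strip s) = PySem.Chars.strip s := by
    have := pv_dropWhile_prefix_fixed PySem.Chars.isspace hl
      (pv_rstrip_prefix (PySem.Chars.lstrip s))
    simpa [PySem.Chars.strip, PySem.Chars.lstrip] using this
  have h2 : PySem.Chars.rstrip (PySem.Chars.rstrip (PySem.Chars.lstrip s))
      = PySem.Chars.rstrip (PySem.Chars.lstrip s) := by
    simp [PySem.Chars.rstrip, List.dropWhile_idempotent]
  calc PySem.Chars.strip (PySem.Chars.strip s)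
      = PySem.Chars.rstrip (PySem.Chars.lstrip (PySem.Chars.strip s)) := rfl
    _ = PySem.Chars.rstrip (PySem.Chars.strip s) := by rw [h1]
    _ = PySem.Chars.strip s := h2

-- B's classification of the next (already-stripped) token = A's classify step at the matching index
theorem pv_classifyB_append (parts : List (List Char)) (buf : List Char) :
    pvClassifyB (PySem.Chars.strip buf) parts.isEmpty (pvProc parts).1 (pvProc parts).2
      = pvProc (parts ++ [PySem.Chars.strip buf]) := by
  have hproc : pvProc (parts ++ [PySem.Chars.strip buf])
      = pvClassifyStep (pvProc parts) ((parts.length : Int), PySem.Chars.strip buf) := by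
    simp [pvProc, pv_enumerate_append]
  rw [hproc]
  cases hp : pvProc parts with
  | mk label options =>
      by_cases hb : (PySem.Chars.strip buf).isEmpty
      · simp [pvClassifyB, pvClassifyStep, hb]
      · by_cases he : '=' ∈ PySem.Chars.strip buf
        · simp [pvClassifyB, pvClassifyStep, hb, he]
        · -- bare token: A tests idx == 0 && label == none, B tests first = parts.isEmpty;
          -- at idx 0 the parts list is empty and label is still none
          by_cases hz : parts = []
          · subst hz
            have hl : label = none := by
              have h0 : pvProc [] = (none, PySem.Dict.empty) := rfl
              rw [hp] at h0; exact (Prod.mk.injEq .. ▸ h0).1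
            simp [pvClassifyB, pvClassifyStep, hb, he, hl, pv_strip_idem]
          · simp [pvClassifyB, pvClassifyStep, hb, he, hz, pv_strip_idem]

-- A's split-fold, characterised by B's next-top-level-comma search
theorem pv_foldl_find (cs : List Char) (parts : List (List Char)) (buf : List Char)
    (depth : Int) (quote : Option Char) :
    pvOut (cs.foldl pvSplitStep (parts, buf, depth, quote)) =
      match pvFindAux cs depth quote with
      | none => pvOut (parts, buf ++ cs, 0, none)
      | some j => pvOut ((cs.drop (j + 1)).foldl pvSplitStep
          (parts ++ [PySem.Chars.strip (buf ++ cs.take j)], [], 0, none)) := by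
  induction cs generalizing parts buf depth quote with
  | nil => simp [pvFindAux, pvOut]
  | cons c rest ih =>
      cases quote with
      | some q =>
          rw [show (c :: rest).foldl pvSplitStep (parts, buf, depth, some q)
              = rest.foldl pvSplitStep (parts, buf ++ [c], depth, if c == q then none else some q) from rfl]
          rw [ih]
          rw [show pvFindAux (c :: rest) depth (some q)
              = (pvFindAux rest depth (if c == q then none else some q)).map (· + 1) from rfl]
          cases hf : pvFindAux rest depth (if c == q then none else some q) with
          | none => simp
          | some j => simp [List.take_succ_cons, List.drop_succ_cons]
      | none =>
          simp only [List.foldl_cons, pvSplitStep, pvFindAux]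
          by_cases hq : (c == '\'' || c == '"') = true
          · rw [if_pos hq, if_pos hq, ih]
            cases hf : pvFindAux rest depth (some c) with
            | none => simp
            | some j => simp [List.take_succ_cons, List.drop_succ_cons]
          · rw [if_neg hq, if_neg hq]
            by_cases hc : (c == ',' &&
                (if c == '(' || c == '[' || c == '{' then depth + 1
                 else if c == ')' || c == ']' || c == '}' then depth - 1 else depth) == 0) = true
            · rw [if_pos hc, if_pos hc]
              have hd0 : (if c == '(' || c == '[' || c == '{' then depth + 1
                 else if c == ')' || c == ']' || c == '}' then depth - 1 else depth) = 0 := by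
                have := (Bool.and_eq_true ..).mp hc
                exact beq_iff_eq.mp this.2
              have hd0' : (if (c = '(' ∨ c = '[') ∨ c = '{' then depth + 1
                 else if (c = ')' ∨ c = ']') ∨ c = '}' then depth - 1 else depth) = 0 := by
                simpa using hd0
              simp [hd0']
            · rw [if_neg hc, if_neg hc, ih]
              cases hf : pvFindAux rest
                  (if c == '(' || c == '[' || c == '{' then depth + 1
                   else if c == ')' || c == ']' || c == '}' then depth - 1 else depth) none with
              | none => simp
              | some j => simp [List.take_succ_cons, List.drop_succ_cons]

-- main invariant: B's tokenizer from a token boundary = classify after A's split-fold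
theorem pv_parse_proc (n : Nat) : ∀ (cs : List Char), cs.length ≤ n → ∀ (parts : List (List Char)),
    pvParseB cs parts.isEmpty (pvProc parts).1 (pvProc parts).2
      = pvOut (cs.foldl pvSplitStep (parts, [], 0, none)) := by
  induction n with
  | zero =>
      intro cs hlen parts
      have hcs : cs = [] := List.length_eq_zero_iff.mp (Nat.le_zero.mp hlen)
      subst hcs
      rw [pvParseB]
      cases hp : pvProc parts with
      | mk l o => simp [pvFindAux, pvClassifyB, pvOut, hp,
          show PySem.Chars.strip ([] : List Char) = [] from rfl]
  | succ n ih =>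
      intro cs hlen parts
      rw [pvParseB]
      split
      next hf =>
          rw [pv_foldl_find cs parts [] 0 none, hf]
          by_cases hcs : cs = []
          · subst hcs
            cases hp : pvProc parts with
            | mk l o => simp [pvClassifyB, pvOut, hp,
                show PySem.Chars.strip ([] : List Char) = [] from rfl]
          · rw [pv_classifyB_append parts cs]
            have hne : cs.isEmpty = false := by simp [hcs]
            cases hp : pvProc (parts ++ [PySem.Chars.strip cs]) with
            | mk l o => simp [pvOut, hne, hp]
      next j hf =>
          have hne : cs ≠ [] := by intro h; subst h; simp [pvFindAux] at hf
          rw [pv_classifyB_append parts (cs.take j)]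
          rw [pv_foldl_find cs parts [] 0 none, hf]
          have hlen' : (cs.drop (j + 1)).length ≤ n := by
            cases cs with
            | nil => exact absurd rfl hne
            | cons a t => simp [List.length_drop] at *; omega
          cases hp : pvProc (parts ++ [PySem.Chars.strip (cs.take j)]) with
          | mk l o =>
              have := ih (cs.drop (j + 1)) hlen' (parts ++ [PySem.Chars.strip (cs.take j)])
              rw [hp] at this
              have hie : (parts ++ [PySem.Chars.strip (cs.take j)]).isEmpty = false := by simp
              rw [hie] at this
              exact this

-- ===== VERDICT (by name: the statement is the Claim_ definition above) =====
theorem parse_label_and_options_py_spec : Claim_equal_parse_label_and_options_py := by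
  intro inside _
  unfold Spec_parse_label_and_options_py parse_label_and_options_py parse_label_and_options_py_alt
  have h := pv_parse_proc inside.toList.length inside.toList (le_refl _) []
  rw [show pvProc [] = (none, PySem.Dict.empty) from rfl] at h
  rw [show (([] : List (List Char)).isEmpty) = true from rfl] at h
  rw [h]
  unfold pvOut pvSplitTopLevelCommas pvProc
  cases inside.toList.foldl pvSplitStep ([], [], 0, none) with
  | mk parts rest =>
      obtain ⟨buf, d, q⟩ := rest
      rfl
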